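-- pv_equiv track=rewrite | github.com/quemeb/USC_research | Huaiyu/AnnoQ/whole_genome_inclusive_exclusive_hpc_updated.py | complete_annotation_agreement
-- ===== SOURCE A (Python) =====
-- def complete_annotation_agreement(uni_clean, AN, SN, VP):
--     """
--     This function compares full aggrement of the unique clean list vs. all
--     other individual lists
--
--     Parameters
--     ----------
--     uni_clean : TYPE
--         unique clean list for each SNP.
--     AN : TYPE
--         Annovar list.
--     SN : TYPE
--         SnpEff list.
--     VP : TYPE
--         VEP list.
--
--     Returns
--     -------
--     TYPE
--         DESCRIPTION.
--
--     """
--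
--     # Initialize a dictionary to store various counts.
--     counters = {
--         'all_agree': 0,
--         'two_agree': 0,
--         'one_agree': 0,
--         'none_agree': 0,
--         'no_annotation_all': 0,  # Counter for no annotation in all of AN, SN, and VP simultaneously.
--         'SA': 0,
--         'SV': 0,
--         'AV': 0,
--         'A': 0,
--         'S': 0,
--         'V': 0,
--     }
--     # Mapping for two-agree scenarios.
--     two_agree_mapping = {
--         'AS': 'SA',
--         'SV': 'SV',
--         'AV': 'AV'
--     }
--
--     # Mapping for one-agree scenarios.
--     one_agree_mapping = {
--         'A': 'A',
--         'S': 'S',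
--         'V': 'V'
--     }
--
--     # Iterate through the lists
--     for i in range(len(uni_clean)):
--         temp = 0  # Temporary counter for the loop.
--         des = []  # List to store which arrays agree with uni_clean.
--
--         zize = len(uni_clean[i])  # Length of the union set for this iteration.
--
--         # Check if AN agrees with uni_clean and update counters.
--         if zize == len(AN[i]):
--             temp += 1
--             des.append('A')
--
--         # Check if SN agrees with uni_clean and update counters.
--         if zize == len(SN[i]):
--             temp += 1
--             des.append('S')
--
--         # Check if VP agrees with uni_clean and update counters.
--         if zize == len(VP[i]):
--             temp += 1
--             des.append('V')
--
--         # Convert list to a string for easier matching.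
--         des_str = ''.join(des)
--
--         # Update the relevant counter based on how many arrays agreed with uni_clean.
--         if temp == 3:  # All agree
--             counters['all_agree'] += 1
--         elif temp == 2:  # Exactly two agree
--             counters['two_agree'] += 1
--             counters[two_agree_mapping[des_str]] += 1
--         elif temp == 1:  # Only one agrees
--             counters['one_agree'] += 1
--             counters[one_agree_mapping[des_str]] += 1
--         elif temp == 0:  # None agree
--             counters['none_agree'] += 1
--
--         # Check if all AN, SN, and VP have no annotation simultaneously, regardless of matching to zize
--         if len(AN[i]) == 0 and len(SN[i]) == 0 and len(VP[i]) == 0: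
--             counters['no_annotation_all'] += 1
--
--     return counters  # Return the counters dictionary.
-- ===== SOURCE B (Python) =====
-- def complete_annotation_agreement(uni_clean, AN, SN, VP):
--     # Staged passes: first materialize three boolean agreement vectors and the
--     # per-row totals, then obtain every counter with its own count/sum pass;
--     # no per-row branch cascade and no counter dict updated inside a loop.
--     n = len(uni_clean)
--     a = [len(uni_clean[i]) == len(AN[i]) for i in range(n)]
--     s = [len(uni_clean[i]) == len(SN[i]) for i in range(n)]
--     v = [len(uni_clean[i]) == len(VP[i]) for i in range(n)]
--     t = [int(a[i]) + int(s[i]) + int(v[i]) for i in range(n)]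
--
--     def cnt(pa, ps, pv):
--         return sum(1 for i in range(n) if a[i] == pa and s[i] == ps and v[i] == pv)
--
--     return {
--         'all_agree': t.count(3),
--         'two_agree': t.count(2),
--         'one_agree': t.count(1),
--         'none_agree': t.count(0),
--         'no_annotation_all': sum(1 for i in range(n)
--                                  if len(AN[i]) == 0 and len(SN[i]) == 0 and len(VP[i]) == 0),
--         'SA': cnt(True, True, False),
--         'SV': cnt(False, True, True),
--         'AV': cnt(True, False, True),
--         'A': cnt(True, False, False),
--         'S': cnt(False, True, False),
--         'V': cnt(False, False, True),
--     }
-- ===== Notes on version B (the rewrite author's own statement) =====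
-- stated objective: alternative
-- what changed: Replaces A's single loop with its per-row branch cascade (temp counter, des string, two mapping dicts, in-place dict increments) by staged passes: three boolean agreement vectors and a totals vector are built first, then each of the eleven counters is obtained by its own count/sum pass over those vectors.
import Mathlib
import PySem

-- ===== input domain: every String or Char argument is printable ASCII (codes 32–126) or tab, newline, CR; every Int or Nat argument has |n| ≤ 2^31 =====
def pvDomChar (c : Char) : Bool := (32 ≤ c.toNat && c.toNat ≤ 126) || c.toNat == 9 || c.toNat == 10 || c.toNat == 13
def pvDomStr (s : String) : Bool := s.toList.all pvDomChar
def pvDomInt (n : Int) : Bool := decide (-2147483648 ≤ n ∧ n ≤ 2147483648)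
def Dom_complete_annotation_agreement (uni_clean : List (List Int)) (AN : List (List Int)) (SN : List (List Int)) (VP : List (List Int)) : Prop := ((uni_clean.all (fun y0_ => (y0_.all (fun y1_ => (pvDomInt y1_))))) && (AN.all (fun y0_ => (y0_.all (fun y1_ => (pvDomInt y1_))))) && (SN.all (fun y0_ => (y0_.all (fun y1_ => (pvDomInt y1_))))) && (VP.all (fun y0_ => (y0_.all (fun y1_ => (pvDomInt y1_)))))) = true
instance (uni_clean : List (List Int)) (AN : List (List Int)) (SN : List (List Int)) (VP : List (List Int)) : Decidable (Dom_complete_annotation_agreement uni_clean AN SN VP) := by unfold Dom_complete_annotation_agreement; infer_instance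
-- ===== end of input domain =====

-- B replaces A's single loop with its branch cascade and in-place counter dict by staged
-- passes: boolean agreement vectors and a totals vector built first, then each counter
-- obtained by its own count/sum pass (objective: alternative decomposition, same cost).

-- ===== PORT A =====
-- A's two literal mapping dicts
def caaTwoAgreeMapping : PySem.Dict String String :=
  PySem.Dict.mk [("AS", "SA"), ("SV", "SV"), ("AV", "AV")]
def caaOneAgreeMapping : PySem.Dict String String :=
  PySem.Dict.mk [("A", "A"), ("S", "S"), ("V", "V")]

-- one iteration of A's loop body; under Pre_ every index i < len(uni_clean) is in range
-- for AN/SN/VP too (Python raises IndexError otherwise), so getD's default is never read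
def caaStepA (uni_clean AN SN VP : List (List Int)) (d : PySem.Dict String Int) (i : Nat) :
    PySem.Dict String Int :=
  let zize := (uni_clean.getD i []).length
  let temp : Int := 0
  let des : List String := []
  let temp := if zize = (AN.getD i []).length then temp + 1 else temp
  let des := if zize = (AN.getD i []).length then des ++ ["A"] else des
  let temp := if zize = (SN.getD i []).length then temp + 1 else temp
  let des := if zize = (SN.getD i []).length then des ++ ["S"] else des
  let temp := if zize = (VP.getD i []).length then temp + 1 else temp
  let des := if zize = (VP.getD i []).length then des ++ ["V"] else des
  let des_str := PySem.Str.join "" des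
  let d :=
    if temp = 3 then d.modify "all_agree" 0 (· + 1)
    else if temp = 2 then
      let d := d.modify "two_agree" 0 (· + 1)
      -- KeyError in two_agree_mapping[des_str] is unreachable: temp = 2 forces des_str ∈ {AS, SV, AV}
      let key := (caaTwoAgreeMapping.get? des_str).getD ""
      d.modify key 0 (· + 1)
    else if temp = 1 then
      let d := d.modify "one_agree" 0 (· + 1)
      let key := (caaOneAgreeMapping.get? des_str).getD ""
      d.modify key 0 (· + 1)
    else if temp = 0 then d.modify "none_agree" 0 (· + 1)
    else d
  if (AN.getD i []).length = 0 ∧ (SN.getD i []).length = 0 ∧ (VP.getD i []).length = 0 then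
    d.modify "no_annotation_all" 0 (· + 1)
  else d

def complete_annotation_agreement (uni_clean : List (List Int)) (AN : List (List Int)) (SN : List (List Int)) (VP : List (List Int)) : List (String × Int) :=
  let counters : PySem.Dict String Int :=
    PySem.Dict.mk [("all_agree", 0), ("two_agree", 0), ("one_agree", 0), ("none_agree", 0),
      ("no_annotation_all", 0), ("SA", 0), ("SV", 0), ("AV", 0), ("A", 0), ("S", 0), ("V", 0)]
  ((List.range uni_clean.length).foldl (caaStepA uni_clean AN SN VP) counters).items

-- ===== PORT B =====
-- Source B: staged passes; a/s/v/t are materialized lists, each counter its own count/sum pass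
def complete_annotation_agreement_alt (uni_clean : List (List Int)) (AN : List (List Int)) (SN : List (List Int)) (VP : List (List Int)) : List (String × Int) :=
  let n := uni_clean.length
  let a := (List.range n).map (fun i => (uni_clean.getD i []).length == (AN.getD i []).length)
  let s := (List.range n).map (fun i => (uni_clean.getD i []).length == (SN.getD i []).length)
  let v := (List.range n).map (fun i => (uni_clean.getD i []).length == (VP.getD i []).length)
  let t := (List.range n).map (fun i =>
    (if a.getD i false then (1 : Int) else 0) + (if s.getD i false then 1 else 0) +
    (if v.getD i false then 1 else 0))
  let cnt := fun (pa ps pv : Bool) =>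
    (Int.ofNat (((List.range n).filter
      (fun i => (a.getD i false == pa) && (s.getD i false == ps) && (v.getD i false == pv))).length))
  [("all_agree", Int.ofNat (t.count 3)),
   ("two_agree", Int.ofNat (t.count 2)),
   ("one_agree", Int.ofNat (t.count 1)),
   ("none_agree", Int.ofNat (t.count 0)),
   ("no_annotation_all", Int.ofNat (((List.range n).filter
      (fun i => ((AN.getD i []).length == 0) && ((SN.getD i []).length == 0) &&
        ((VP.getD i []).length == 0))).length)),
   ("SA", cnt true true false), ("SV", cnt false true true), ("AV", cnt true false true),
   ("A", cnt true false false), ("S", cnt false true false), ("V", cnt false false true)]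

-- ===== PRECONDITION & SPEC =====
-- Pre_ excludes exactly the inputs on which AN, SN or VP is shorter than uni_clean:
-- there Python A (and B) raise IndexError.
def Pre_complete_annotation_agreement (uni_clean : List (List Int)) (AN : List (List Int)) (SN : List (List Int)) (VP : List (List Int)) : Prop :=
  uni_clean.length ≤ AN.length ∧ uni_clean.length ≤ SN.length ∧ uni_clean.length ≤ VP.length
instance (uni_clean : List (List Int)) (AN : List (List Int)) (SN : List (List Int)) (VP : List (List Int)) : Decidable (Pre_complete_annotation_agreement uni_clean AN SN VP) := by unfold Pre_complete_annotation_agreement; infer_instance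

def pvWitness_complete_annotation_agreement : List (List Int) × List (List Int) × List (List Int) × List (List Int) :=
  ([[1], [2, 3]], [[1], []], [[4], [5, 6]], [[], [7, 8]])

def Spec_complete_annotation_agreement (uni_clean : List (List Int)) (AN : List (List Int)) (SN : List (List Int)) (VP : List (List Int)) (out : List (String × Int)) : Prop := out = complete_annotation_agreement_alt uni_clean AN SN VP
instance (uni_clean : List (List Int)) (AN : List (List Int)) (SN : List (List Int)) (VP : List (List Int)) (out : List (String × Int)) : Decidable (Spec_complete_annotation_agreement uni_clean AN SN VP out) := by unfold Spec_complete_annotation_agreement; infer_instance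

-- ===== CLAIM (what is proved, stated in full; the proofs are below) =====
def Claim_equal_complete_annotation_agreement : Prop := ∀ (uni_clean : List (List Int)) (AN : List (List Int)) (SN : List (List Int)) (VP : List (List Int)), Dom_complete_annotation_agreement uni_clean AN SN VP → Pre_complete_annotation_agreement uni_clean AN SN VP → Spec_complete_annotation_agreement uni_clean AN SN VP (complete_annotation_agreement uni_clean AN SN VP)

-- ===== LEMMAS AND PROOFS =====

-- the three per-row agreement booleans and the derived pattern predicates
def caaA (uni_clean AN : List (List Int)) (i : Nat) : Bool :=
  decide ((uni_clean.getD i []).length = (AN.getD i []).length)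
def caaAll (uni_clean AN SN VP : List (List Int)) (i : Nat) : Bool :=
  caaA uni_clean AN i && caaA uni_clean SN i && caaA uni_clean VP i
def caaSA (uni_clean AN SN VP : List (List Int)) (i : Nat) : Bool :=
  caaA uni_clean AN i && caaA uni_clean SN i && !caaA uni_clean VP i
def caaSV (uni_clean AN SN VP : List (List Int)) (i : Nat) : Bool :=
  !caaA uni_clean AN i && caaA uni_clean SN i && caaA uni_clean VP i
def caaAV (uni_clean AN SN VP : List (List Int)) (i : Nat) : Bool :=
  caaA uni_clean AN i && !caaA uni_clean SN i && caaA uni_clean VP i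
def caaTwo (uni_clean AN SN VP : List (List Int)) (i : Nat) : Bool :=
  caaSA uni_clean AN SN VP i || caaSV uni_clean AN SN VP i || caaAV uni_clean AN SN VP i
def caaOnlyA (uni_clean AN SN VP : List (List Int)) (i : Nat) : Bool :=
  caaA uni_clean AN i && !caaA uni_clean SN i && !caaA uni_clean VP i
def caaOnlyS (uni_clean AN SN VP : List (List Int)) (i : Nat) : Bool :=
  !caaA uni_clean AN i && caaA uni_clean SN i && !caaA uni_clean VP i
def caaOnlyV (uni_clean AN SN VP : List (List Int)) (i : Nat) : Bool :=
  !caaA uni_clean AN i && !caaA uni_clean SN i && caaA uni_clean VP i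
def caaOne (uni_clean AN SN VP : List (List Int)) (i : Nat) : Bool :=
  caaOnlyA uni_clean AN SN VP i || caaOnlyS uni_clean AN SN VP i || caaOnlyV uni_clean AN SN VP i
def caaNone (uni_clean AN SN VP : List (List Int)) (i : Nat) : Bool :=
  !caaA uni_clean AN i && !caaA uni_clean SN i && !caaA uni_clean VP i
def caaEmp (AN SN VP : List (List Int)) (i : Nat) : Bool :=
  decide ((AN.getD i []).length = 0 ∧ (SN.getD i []).length = 0 ∧ (VP.getD i []).length = 0)

def caaCnt (p : Nat → Bool) (l : List Nat) : Int := Int.ofNat ((l.filter p).length)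

lemma caaKey_AS : (caaTwoAgreeMapping.get? (PySem.Str.join "" ["A", "S"])).getD "" = "SA" := by rfl
lemma caaKey_AV : (caaTwoAgreeMapping.get? (PySem.Str.join "" ["A", "V"])).getD "" = "AV" := by rfl
lemma caaKey_SV : (caaTwoAgreeMapping.get? (PySem.Str.join "" ["S", "V"])).getD "" = "SV" := by rfl
lemma caaKey_A : (caaOneAgreeMapping.get? (PySem.Str.join "" ["A"])).getD "" = "A" := by rfl
lemma caaKey_S : (caaOneAgreeMapping.get? (PySem.Str.join "" ["S"])).getD "" = "S" := by rfl
lemma caaKey_V : (caaOneAgreeMapping.get? (PySem.Str.join "" ["V"])).getD "" = "V" := by rfl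

-- dict bump lemmas: modify on the literal counter dict
lemma caaBump_0 (v0 v1 v2 v3 v4 v5 v6 v7 v8 v9 v10 : Int) :
    PySem.Dict.modify (PySem.Dict.mk [("all_agree", v0), ("two_agree", v1), ("one_agree", v2), ("none_agree", v3), ("no_annotation_all", v4), ("SA", v5), ("SV", v6), ("AV", v7), ("A", v8), ("S", v9), ("V", v10)]) "all_agree" 0 (· + 1)
      = PySem.Dict.mk [("all_agree", v0 + 1), ("two_agree", v1), ("one_agree", v2), ("none_agree", v3), ("no_annotation_all", v4), ("SA", v5), ("SV", v6), ("AV", v7), ("A", v8), ("S", v9), ("V", v10)] := by rfl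

lemma caaBump_1 (v0 v1 v2 v3 v4 v5 v6 v7 v8 v9 v10 : Int) :
    PySem.Dict.modify (PySem.Dict.mk [("all_agree", v0), ("two_agree", v1), ("one_agree", v2), ("none_agree", v3), ("no_annotation_all", v4), ("SA", v5), ("SV", v6), ("AV", v7), ("A", v8), ("S", v9), ("V", v10)]) "two_agree" 0 (· + 1)
      = PySem.Dict.mk [("all_agree", v0), ("two_agree", v1 + 1), ("one_agree", v2), ("none_agree", v3), ("no_annotation_all", v4), ("SA", v5), ("SV", v6), ("AV", v7), ("A", v8), ("S", v9), ("V", v10)] := by rfl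

lemma caaBump_2 (v0 v1 v2 v3 v4 v5 v6 v7 v8 v9 v10 : Int) :
    PySem.Dict.modify (PySem.Dict.mk [("all_agree", v0), ("two_agree", v1), ("one_agree", v2), ("none_agree", v3), ("no_annotation_all", v4), ("SA", v5), ("SV", v6), ("AV", v7), ("A", v8), ("S", v9), ("V", v10)]) "one_agree" 0 (· + 1)
      = PySem.Dict.mk [("all_agree", v0), ("two_agree", v1), ("one_agree", v2 + 1), ("none_agree", v3), ("no_annotation_all", v4), ("SA", v5), ("SV", v6), ("AV", v7), ("A", v8), ("S", v9), ("V", v10)] := by rfl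

lemma caaBump_3 (v0 v1 v2 v3 v4 v5 v6 v7 v8 v9 v10 : Int) :
    PySem.Dict.modify (PySem.Dict.mk [("all_agree", v0), ("two_agree", v1), ("one_agree", v2), ("none_agree", v3), ("no_annotation_all", v4), ("SA", v5), ("SV", v6), ("AV", v7), ("A", v8), ("S", v9), ("V", v10)]) "none_agree" 0 (· + 1)
      = PySem.Dict.mk [("all_agree", v0), ("two_agree", v1), ("one_agree", v2), ("none_agree", v3 + 1), ("no_annotation_all", v4), ("SA", v5), ("SV", v6), ("AV", v7), ("A", v8), ("S", v9), ("V", v10)] := by rfl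

lemma caaBump_4 (v0 v1 v2 v3 v4 v5 v6 v7 v8 v9 v10 : Int) :
    PySem.Dict.modify (PySem.Dict.mk [("all_agree", v0), ("two_agree", v1), ("one_agree", v2), ("none_agree", v3), ("no_annotation_all", v4), ("SA", v5), ("SV", v6), ("AV", v7), ("A", v8), ("S", v9), ("V", v10)]) "no_annotation_all" 0 (· + 1)
      = PySem.Dict.mk [("all_agree", v0), ("two_agree", v1), ("one_agree", v2), ("none_agree", v3), ("no_annotation_all", v4 + 1), ("SA", v5), ("SV", v6), ("AV", v7), ("A", v8), ("S", v9), ("V", v10)] := by rfl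

lemma caaBump_5 (v0 v1 v2 v3 v4 v5 v6 v7 v8 v9 v10 : Int) :
    PySem.Dict.modify (PySem.Dict.mk [("all_agree", v0), ("two_agree", v1), ("one_agree", v2), ("none_agree", v3), ("no_annotation_all", v4), ("SA", v5), ("SV", v6), ("AV", v7), ("A", v8), ("S", v9), ("V", v10)]) "SA" 0 (· + 1)
      = PySem.Dict.mk [("all_agree", v0), ("two_agree", v1), ("one_agree", v2), ("none_agree", v3), ("no_annotation_all", v4), ("SA", v5 + 1), ("SV", v6), ("AV", v7), ("A", v8), ("S", v9), ("V", v10)] := by rfl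

lemma caaBump_6 (v0 v1 v2 v3 v4 v5 v6 v7 v8 v9 v10 : Int) :
    PySem.Dict.modify (PySem.Dict.mk [("all_agree", v0), ("two_agree", v1), ("one_agree", v2), ("none_agree", v3), ("no_annotation_all", v4), ("SA", v5), ("SV", v6), ("AV", v7), ("A", v8), ("S", v9), ("V", v10)]) "SV" 0 (· + 1)
      = PySem.Dict.mk [("all_agree", v0), ("two_agree", v1), ("one_agree", v2), ("none_agree", v3), ("no_annotation_all", v4), ("SA", v5), ("SV", v6 + 1), ("AV", v7), ("A", v8), ("S", v9), ("V", v10)] := by rfl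

lemma caaBump_7 (v0 v1 v2 v3 v4 v5 v6 v7 v8 v9 v10 : Int) :
    PySem.Dict.modify (PySem.Dict.mk [("all_agree", v0), ("two_agree", v1), ("one_agree", v2), ("none_agree", v3), ("no_annotation_all", v4), ("SA", v5), ("SV", v6), ("AV", v7), ("A", v8), ("S", v9), ("V", v10)]) "AV" 0 (· + 1)
      = PySem.Dict.mk [("all_agree", v0), ("two_agree", v1), ("one_agree", v2), ("none_agree", v3), ("no_annotation_all", v4), ("SA", v5), ("SV", v6), ("AV", v7 + 1), ("A", v8), ("S", v9), ("V", v10)] := by rfl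

lemma caaBump_8 (v0 v1 v2 v3 v4 v5 v6 v7 v8 v9 v10 : Int) :
    PySem.Dict.modify (PySem.Dict.mk [("all_agree", v0), ("two_agree", v1), ("one_agree", v2), ("none_agree", v3), ("no_annotation_all", v4), ("SA", v5), ("SV", v6), ("AV", v7), ("A", v8), ("S", v9), ("V", v10)]) "A" 0 (· + 1)
      = PySem.Dict.mk [("all_agree", v0), ("two_agree", v1), ("one_agree", v2), ("none_agree", v3), ("no_annotation_all", v4), ("SA", v5), ("SV", v6), ("AV", v7), ("A", v8 + 1), ("S", v9), ("V", v10)] := by rfl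

lemma caaBump_9 (v0 v1 v2 v3 v4 v5 v6 v7 v8 v9 v10 : Int) :
    PySem.Dict.modify (PySem.Dict.mk [("all_agree", v0), ("two_agree", v1), ("one_agree", v2), ("none_agree", v3), ("no_annotation_all", v4), ("SA", v5), ("SV", v6), ("AV", v7), ("A", v8), ("S", v9), ("V", v10)]) "S" 0 (· + 1)
      = PySem.Dict.mk [("all_agree", v0), ("two_agree", v1), ("one_agree", v2), ("none_agree", v3), ("no_annotation_all", v4), ("SA", v5), ("SV", v6), ("AV", v7), ("A", v8), ("S", v9 + 1), ("V", v10)] := by rfl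

lemma caaBump_10 (v0 v1 v2 v3 v4 v5 v6 v7 v8 v9 v10 : Int) :
    PySem.Dict.modify (PySem.Dict.mk [("all_agree", v0), ("two_agree", v1), ("one_agree", v2), ("none_agree", v3), ("no_annotation_all", v4), ("SA", v5), ("SV", v6), ("AV", v7), ("A", v8), ("S", v9), ("V", v10)]) "V" 0 (· + 1)
      = PySem.Dict.mk [("all_agree", v0), ("two_agree", v1), ("one_agree", v2), ("none_agree", v3), ("no_annotation_all", v4), ("SA", v5), ("SV", v6), ("AV", v7), ("A", v8), ("S", v9), ("V", v10 + 1)] := by rfl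

-- literal arithmetic facts for A's temp dispatch
lemma caaArith1 : ((0 : Int) + 1 = 3) = False := by norm_num
lemma caaArith2 : ((0 : Int) + 1 + 1 = 3) = False := by norm_num
lemma caaArith3 : ((0 : Int) + 1 + 1 + 1 = 3) = True := by norm_num
lemma caaArith4 : ((0 : Int) = 3) = False := by norm_num
lemma caaArith5 : ((0 : Int) = 2) = False := by norm_num
lemma caaArith6 : ((0 : Int) + 1 = 2) = False := by norm_num
lemma caaArith7 : ((0 : Int) + 1 + 1 = 2) = True := by norm_num
lemma caaArith8 : ((0 : Int) = 1) = False := by norm_num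
lemma caaArith9 : ((0 : Int) + 1 = 1) = True := by norm_num
lemma caaArith10 : ((0 : Int) = 0) = True := by norm_num

-- one A-step, written as a pointwise bump by the pattern predicates
set_option maxHeartbeats 4000000 in
lemma caaStepA_eq (uni_clean AN SN VP : List (List Int)) (i : Nat)
    (v0 v1 v2 v3 v4 v5 v6 v7 v8 v9 v10 : Int) :
    caaStepA uni_clean AN SN VP
      (PySem.Dict.mk [("all_agree", v0), ("two_agree", v1), ("one_agree", v2), ("none_agree", v3),
        ("no_annotation_all", v4), ("SA", v5), ("SV", v6), ("AV", v7), ("A", v8), ("S", v9),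
        ("V", v10)]) i
    = PySem.Dict.mk
      [("all_agree", v0 + if caaAll uni_clean AN SN VP i then 1 else 0),
       ("two_agree", v1 + if caaTwo uni_clean AN SN VP i then 1 else 0),
       ("one_agree", v2 + if caaOne uni_clean AN SN VP i then 1 else 0),
       ("none_agree", v3 + if caaNone uni_clean AN SN VP i then 1 else 0),
       ("no_annotation_all", v4 + if caaEmp AN SN VP i then 1 else 0),
       ("SA", v5 + if caaSA uni_clean AN SN VP i then 1 else 0),
       ("SV", v6 + if caaSV uni_clean AN SN VP i then 1 else 0),
       ("AV", v7 + if caaAV uni_clean AN SN VP i then 1 else 0),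
       ("A", v8 + if caaOnlyA uni_clean AN SN VP i then 1 else 0),
       ("S", v9 + if caaOnlyS uni_clean AN SN VP i then 1 else 0),
       ("V", v10 + if caaOnlyV uni_clean AN SN VP i then 1 else 0)] := by
  by_cases hA : (uni_clean.getD i []).length = (AN.getD i []).length <;>
  by_cases hS : (uni_clean.getD i []).length = (SN.getD i []).length <;>
  by_cases hV : (uni_clean.getD i []).length = (VP.getD i []).length <;>
  by_cases hE : (AN.getD i []).length = 0 ∧ (SN.getD i []).length = 0 ∧ (VP.getD i []).length = 0 <;>
  (first | replace hA := eq_false hA | replace hA := eq_true hA) <;>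
  (first | replace hS := eq_false hS | replace hS := eq_true hS) <;>
  (first | replace hV := eq_false hV | replace hV := eq_true hV) <;>
  (first | replace hE := eq_false hE | replace hE := eq_true hE) <;>
  · simp only [caaStepA, caaAll, caaTwo, caaOne, caaNone, caaEmp, caaSA, caaSV, caaAV,
      caaOnlyA, caaOnlyS, caaOnlyV, caaA, hA, hS, hV, hE, decide_true, decide_false,
      if_true, if_false, ite_true, ite_false,
      List.nil_append, List.cons_append, List.singleton_append]
    try simp only [caaArith1, caaArith2, caaArith3, caaArith4, caaArith5, caaArith6,
      caaArith7, caaArith8, caaArith9, caaArith10, if_true, if_false, ite_true, ite_false]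
    try simp only [caaKey_AS, caaKey_AV, caaKey_SV, caaKey_A, caaKey_S, caaKey_V,
      caaBump_0, caaBump_1, caaBump_2, caaBump_3, caaBump_4, caaBump_5, caaBump_6, caaBump_7,
      caaBump_8, caaBump_9, caaBump_10]
    try simp
    try omega

lemma caaCnt_cons (p : Nat → Bool) (i : Nat) (l : List Nat) :
    caaCnt p (i :: l) = (if p i then 1 else 0) + caaCnt p l := by
  simp only [caaCnt, List.filter_cons]
  split_ifs <;> simp [List.length_cons] <;> omega

-- A's whole loop in closed form: each counter is the count of its pattern predicate
lemma caaFoldA (uni_clean AN SN VP : List (List Int)) (l : List Nat) :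
    ∀ v0 v1 v2 v3 v4 v5 v6 v7 v8 v9 v10 : Int,
    l.foldl (caaStepA uni_clean AN SN VP)
      (PySem.Dict.mk [("all_agree", v0), ("two_agree", v1), ("one_agree", v2), ("none_agree", v3),
        ("no_annotation_all", v4), ("SA", v5), ("SV", v6), ("AV", v7), ("A", v8), ("S", v9),
        ("V", v10)])
    = PySem.Dict.mk
      [("all_agree", v0 + caaCnt (caaAll uni_clean AN SN VP) l),
       ("two_agree", v1 + caaCnt (caaTwo uni_clean AN SN VP) l),
       ("one_agree", v2 + caaCnt (caaOne uni_clean AN SN VP) l),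
       ("none_agree", v3 + caaCnt (caaNone uni_clean AN SN VP) l),
       ("no_annotation_all", v4 + caaCnt (caaEmp AN SN VP) l),
       ("SA", v5 + caaCnt (caaSA uni_clean AN SN VP) l),
       ("SV", v6 + caaCnt (caaSV uni_clean AN SN VP) l),
       ("AV", v7 + caaCnt (caaAV uni_clean AN SN VP) l),
       ("A", v8 + caaCnt (caaOnlyA uni_clean AN SN VP) l),
       ("S", v9 + caaCnt (caaOnlyS uni_clean AN SN VP) l),
       ("V", v10 + caaCnt (caaOnlyV uni_clean AN SN VP) l)] := by
  induction l with
  | nil => intro v0 v1 v2 v3 v4 v5 v6 v7 v8 v9 v10; simp [caaCnt]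
  | cons i l ih =>
    intro v0 v1 v2 v3 v4 v5 v6 v7 v8 v9 v10
    rw [List.foldl_cons, caaStepA_eq, ih]
    simp only [caaCnt_cons, PySem.Dict.mk.injEq, List.cons.injEq, Prod.mk.injEq, and_true,
      true_and]
    refine ⟨by ring, by ring, by ring, by ring, by ring, by ring, by ring, by ring, by ring,
      by ring, by ring⟩

-- B-side helpers
lemma caaGetD_map {α : Type} (n i : Nat) (f : Nat → α) (d : α) (h : i < n) :
    ((List.range n).map f).getD i d = f i := by
  simp [List.getD_eq_getElem?_getD, h]

lemma caaCount_map (n : Nat) (g : Nat → Int) (c : Int) :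
    ((List.range n).map g).count c = ((List.range n).filter (fun i => g i == c)).length := by
  rw [List.count_eq_countP, List.countP_map, List.countP_eq_length_filter]
  rfl

lemma caaFilterEq (n : Nat) (p q : Nat → Bool) (h : ∀ i, i < n → p i = q i) :
    (List.range n).filter p = (List.range n).filter q := by
  apply List.filter_congr
  intro i hi
  exact h i (List.mem_range.mp hi)

lemma caaBeqNat (a b : Nat) : (a == b) = decide (a = b) := by
  by_cases h : a = b <;> simp [h]

lemma caaSum3_3 (x y z : Bool) :
    (((if x then (1 : Int) else 0) + (if y then 1 else 0) + (if z then 1 else 0)) == 3)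
      = (x && y && z) := by cases x <;> cases y <;> cases z <;> decide
lemma caaSum3_2 (x y z : Bool) :
    (((if x then (1 : Int) else 0) + (if y then 1 else 0) + (if z then 1 else 0)) == 2)
      = ((x && y && !z) || (!x && y && z) || (x && !y && z)) := by
  cases x <;> cases y <;> cases z <;> decide
lemma caaSum3_1 (x y z : Bool) :
    (((if x then (1 : Int) else 0) + (if y then 1 else 0) + (if z then 1 else 0)) == 1)
      = ((x && !y && !z) || (!x && y && !z) || (!x && !y && z)) := by
  cases x <;> cases y <;> cases z <;> decide
lemma caaSum3_0 (x y z : Bool) :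
    (((if x then (1 : Int) else 0) + (if y then 1 else 0) + (if z then 1 else 0)) == 0)
      = (!x && !y && !z) := by cases x <;> cases y <;> cases z <;> decide

lemma caaPat (x y z pa ps pv : Bool) :
    ((x == pa) && (y == ps) && (z == pv))
      = ((if pa then x else !x) && (if ps then y else !y) && (if pv then z else !z)) := by
  cases x <;> cases y <;> cases z <;> cases pa <;> cases ps <;> cases pv <;> decide

-- ===== VERDICT (by name: the statement is the Claim_ definition above) =====
theorem complete_annotation_agreement_spec : Claim_equal_complete_annotation_agreement := by
  intro uni_clean AN SN VP _ _
  unfold Spec_complete_annotation_agreement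
  simp only [complete_annotation_agreement, complete_annotation_agreement_alt]
  rw [caaFoldA]
  simp only [zero_add, List.cons.injEq, Prod.mk.injEq, true_and, and_true]
  refine ⟨?_, ?_, ?_, ?_, ?_, ?_, ?_, ?_, ?_, ?_, ?_⟩
  · rw [caaCount_map]
    unfold caaCnt
    congr 1
    refine congrArg List.length (caaFilterEq _ _ _ ?_)
    intro i hi
    rw [caaGetD_map _ _ _ _ hi, caaGetD_map _ _ _ _ hi, caaGetD_map _ _ _ _ hi, caaSum3_3]
    simp [caaAll, caaA, caaBeqNat]
  · rw [caaCount_map]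
    unfold caaCnt
    congr 1
    refine congrArg List.length (caaFilterEq _ _ _ ?_)
    intro i hi
    rw [caaGetD_map _ _ _ _ hi, caaGetD_map _ _ _ _ hi, caaGetD_map _ _ _ _ hi, caaSum3_2]
    simp [caaTwo, caaSA, caaSV, caaAV, caaA, caaBeqNat]
  · rw [caaCount_map]
    unfold caaCnt
    congr 1
    refine congrArg List.length (caaFilterEq _ _ _ ?_)
    intro i hi
    rw [caaGetD_map _ _ _ _ hi, caaGetD_map _ _ _ _ hi, caaGetD_map _ _ _ _ hi, caaSum3_1]
    simp [caaOne, caaOnlyA, caaOnlyS, caaOnlyV, caaA, caaBeqNat]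
  · rw [caaCount_map]
    unfold caaCnt
    congr 1
    refine congrArg List.length (caaFilterEq _ _ _ ?_)
    intro i hi
    rw [caaGetD_map _ _ _ _ hi, caaGetD_map _ _ _ _ hi, caaGetD_map _ _ _ _ hi, caaSum3_0]
    simp [caaNone, caaA, caaBeqNat]
  · unfold caaCnt
    congr 1
    refine congrArg List.length (caaFilterEq _ _ _ ?_)
    intro i _
    simp [caaEmp, caaBeqNat, Bool.and_assoc]
  · unfold caaCnt
    congr 1
    refine congrArg List.length (caaFilterEq _ _ _ ?_)
    intro i hi
    rw [caaGetD_map _ _ _ _ hi, caaGetD_map _ _ _ _ hi, caaGetD_map _ _ _ _ hi, caaPat]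
    simp [caaSA, caaA, caaBeqNat]
  · unfold caaCnt
    congr 1
    refine congrArg List.length (caaFilterEq _ _ _ ?_)
    intro i hi
    rw [caaGetD_map _ _ _ _ hi, caaGetD_map _ _ _ _ hi, caaGetD_map _ _ _ _ hi, caaPat]
    simp [caaSV, caaA, caaBeqNat]
  · unfold caaCnt
    congr 1
    refine congrArg List.length (caaFilterEq _ _ _ ?_)
    intro i hi
    rw [caaGetD_map _ _ _ _ hi, caaGetD_map _ _ _ _ hi, caaGetD_map _ _ _ _ hi, caaPat]
    simp [caaAV, caaA, caaBeqNat]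
  · unfold caaCnt
    congr 1
    refine congrArg List.length (caaFilterEq _ _ _ ?_)
    intro i hi
    rw [caaGetD_map _ _ _ _ hi, caaGetD_map _ _ _ _ hi, caaGetD_map _ _ _ _ hi, caaPat]
    simp [caaOnlyA, caaA, caaBeqNat]
  · unfold caaCnt
    congr 1
    refine congrArg List.length (caaFilterEq _ _ _ ?_)
    intro i hi
    rw [caaGetD_map _ _ _ _ hi, caaGetD_map _ _ _ _ hi, caaGetD_map _ _ _ _ hi, caaPat]
    simp [caaOnlyS, caaA, caaBeqNat]
  · unfold caaCnt
    congr 1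
    refine congrArg List.length (caaFilterEq _ _ _ ?_)
    intro i hi
    rw [caaGetD_map _ _ _ _ hi, caaGetD_map _ _ _ _ hi, caaGetD_map _ _ _ _ hi, caaPat]
    simp [caaOnlyV, caaA, caaBeqNat]
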